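-- pv_equiv track=rewrite | github.com/QuentinDeHaes/RP2 | eclat/Eclat.py | True_Eclat_maximal
-- ===== SOURCE A (Python) =====
-- def flatten_dict(dic: dict, only_first: bool):
--     """
--     flatten the dict of dicts into a single dict
--     :param dic: the full original dict
--     :param only_first: bool: make the key Only the key of the second dict of make it in the form key1:key2
--     :return: flattened dict
--     """
--     new_dic = dict()
--     for key in dic:
--         for key2 in dic[key]:
--             if only_first:
--                 new_dic[(key2,)] = dic[key][key2]
--             else:
--                 new_dic[((key, key2),)] = dic[key][key2]
--
--     return new_dic
--
-- def True_Eclat_maximal(tidlists, min_sup: int, only_first: bool = True):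
--     """
--     The eclat using DFS so the correct implementation
--     :param tidlists: the dict given by (new_)generate_tidlists
--     :param min_sup: the minimal required support needed for testing
--     :param only_first: a boolean used to state using only the value (True) or both value and the itemtype of the values
--     :return: a dict of all (min_sup) values per size
--     """
--     tidlists = flatten_dict(tidlists, only_first)
--     to_delete = set()
--     for key in tidlists:
--         if len(tidlists[key]) < min_sup:
--             to_delete.add(key)
--     for key in to_delete:
--         del tidlists[key]
--
--     all_supported = []
--
--     all_tids = list(tidlists.keys())
--     to_delete = set()
--     for i in range(len(all_tids)):
--         y= _eclat_rec((all_tids[i], tidlists[all_tids[i]]), all_tids[i + 1:], min_sup, tidlists)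
--         if len(y)!= 0:
--             to_delete.add(all_tids[i])
--         all_supported += y
--
--
--     for key in to_delete:
--         del tidlists[key]
--     # r = max(map(len, all_supported))
--     r = max([len(t[0]) for t in all_supported])
--     all_tids = {1: tidlists}
--     for i in range(2, r + 1):
--         all_tids[i] = dict()
--     for val in all_supported:
--         all_tids[len(val[0])][val[0]] = val[1]
--
--     return all_tids
--
-- def _eclat_rec(current_thing: tuple, remaining: list, min_sup: int, length1_tidlists: dict):
--     """
--     the recursive function used within the eclat function
--     :param current_thing: a tuple of a tuple (combination of values) and a set of it's intersections of tids
--     :param remaining: all values that should still be attempted to be intersected with the current_thing values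
--     :param min_sup: the minimal support
--     :param length1_tidlists:  a dict of tidlists for singular values (of greater than min_sup)
--     :return: a list of all current_thing + remaining combinations that have a support greater than min_sup
--     """
--     x = []
--     for i in range(len(remaining)):
--         inter = current_thing[1].intersection(length1_tidlists[remaining[i]])
--
--         if len(inter) >= min_sup :
--             new_thing = (current_thing[0] + (remaining[i][0],), inter)
--
--             y = _eclat_rec(new_thing, remaining[i + 1:], min_sup, length1_tidlists)
--             if len(y) == 0:
--                 x.append(new_thing)
--             else:
--                 x += y
--
--     return x
-- ===== SOURCE B (Python) =====
-- def _frequent_extensions(itemset, tids, rem, min_sup, flat):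
--     out = []
--     for j in range(len(rem)):
--         rk = rem[j]
--         inter = tids & flat[rk]
--         if len(inter) >= min_sup:
--             out.append((itemset + (rk[0],), inter, rem[j + 1:]))
--     return out
--
--
-- def True_Eclat_maximal(tidlists, min_sup: int, only_first: bool = True):
--     flat = {}
--     for key in tidlists:
--         for key2 in tidlists[key]:
--             k = (key2,) if only_first else ((key, key2),)
--             flat[k] = tidlists[key][key2]
--     flat = {k: v for k, v in flat.items() if len(v) >= min_sup}
--     keys = list(flat)
--     all_supported = []
--     level1 = {}
--     for i in range(len(keys)):
--         k = keys[i]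
--         children = _frequent_extensions(k, flat[k], keys[i + 1:], min_sup, flat)
--         if not children:
--             level1[k] = flat[k]
--         else:
--             stack = children[::-1]
--             while stack:
--                 itemset, tids, rem = stack.pop()
--                 grand = _frequent_extensions(itemset, tids, rem, min_sup, flat)
--                 if not grand:
--                     all_supported.append((itemset, tids))
--                 else:
--                     stack.extend(reversed(grand))
--     r = max(len(t[0]) for t in all_supported)
--     result = {1: level1}
--     for size in range(2, r + 1):
--         result[size] = {}
--     for itemset, tids in all_supported:
--         result[len(itemset)][itemset] = tids
--     return result
-- ===== Notes on version B (the rewrite author's own statement) =====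
-- stated objective: alternative
-- what changed: B replaces the recursive _eclat_rec helper by an explicit stack-driven DFS (work items of (itemset, tidset, remaining candidates); a popped node with no frequent extension is emitted as maximal, otherwise its extensions are pushed) and replaces A's two build-a-delete-set-then-delete dict passes by a single filtering comprehension and direct insertion of surviving singletons into level1.
import Mathlib
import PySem

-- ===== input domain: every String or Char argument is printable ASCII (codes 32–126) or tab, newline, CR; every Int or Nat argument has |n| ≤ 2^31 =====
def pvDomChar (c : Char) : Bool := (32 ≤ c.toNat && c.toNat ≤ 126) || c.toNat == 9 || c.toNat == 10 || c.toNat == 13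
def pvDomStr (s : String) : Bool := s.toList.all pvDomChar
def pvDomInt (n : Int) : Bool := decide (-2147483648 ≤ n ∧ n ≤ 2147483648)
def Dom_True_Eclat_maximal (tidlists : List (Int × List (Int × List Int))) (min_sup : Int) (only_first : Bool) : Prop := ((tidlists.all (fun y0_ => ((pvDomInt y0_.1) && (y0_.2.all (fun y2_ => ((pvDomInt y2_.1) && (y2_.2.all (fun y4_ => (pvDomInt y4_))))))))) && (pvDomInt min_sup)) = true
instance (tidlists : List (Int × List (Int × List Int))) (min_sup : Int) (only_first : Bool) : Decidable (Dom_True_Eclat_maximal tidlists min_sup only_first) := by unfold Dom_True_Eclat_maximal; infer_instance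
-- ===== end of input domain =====

-- B replaces A's recursive helper by an explicit stack-driven DFS and A's two build-then-delete
-- dict loops by single filtering/inserting passes (objective: alternative; same asymptotic cost).

-- ===== PORT A =====
-- flatten_dict: keys are the 1-tuples (key2,) (only_first) resp. ((key, key2),); a 1-tuple of ints
-- is ported as a List Int.  The ((key, key2),) key of the only_first = False branch is not
-- representable as List Int — that branch (excluded by Pre_) is ported as the list [key, key2].
def pvFlattenDict (dic : List (Int × List (Int × List Int))) (only_first : Bool) :
    PySem.Dict (List Int) (List Int) :=
  dic.foldl (fun nd kv =>
    kv.2.foldl (fun nd2 kv2 =>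
      if only_first then nd2.insert [kv2.1] kv2.2 else nd2.insert [kv.1, kv2.1] kv2.2) nd)
    PySem.Dict.empty

-- _eclat_rec: the 'for i in range(len(remaining))' loop with remaining[i+1:] becomes the
-- structural recursion over 'remaining'; the tid-sets are PySem.Set Int.
def pvEclatRec (current : List Int × List Int) (remaining : List (List Int)) (min_sup : Int)
    (length1 : PySem.Dict (List Int) (List Int)) : List (List Int × List Int) :=
  match remaining with
  | [] => []
  | r :: rest =>
    let inter := PySem.Set.inter current.2 (length1.getD r [])
    (if min_sup ≤ PySem.Set.len inter then
       let newThing := (current.1 ++ [PySem.List.pyGetD r 0 0], inter)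
       let y := pvEclatRec newThing rest min_sup length1
       if y = [] then [newThing] else y
     else []) ++ pvEclatRec current rest min_sup length1

-- the 'for i in range(len(all_tids))' loop, carrying (all_supported, to_delete)
def pvTopLoopA (tl : PySem.Dict (List Int) (List Int)) (min_sup : Int) :
    List (List Int) → List (List Int × List Int) → PySem.Set (List Int) →
    List (List Int × List Int) × PySem.Set (List Int)
  | [], acc, td => (acc, td)
  | k :: rest, acc, td =>
    let y := pvEclatRec (k, tl.getD k []) rest min_sup tl
    pvTopLoopA tl min_sup rest (acc ++ y)
      (if PySem.List.len y ≠ 0 then PySem.Set.add td k else td)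

def True_Eclat_maximal (tidlists : List (Int × List (Int × List Int))) (min_sup : Int) (only_first : Bool) : List (Int × List (List Int × List Int)) :=
  let tl0 := pvFlattenDict tidlists only_first
  let toDelete := tl0.keys.foldl
    (fun s key => if PySem.Set.len (tl0.getD key []) < min_sup then PySem.Set.add s key else s)
    PySem.Set.empty
  let tl := toDelete.foldl (fun d key => d.erase key) tl0
  let allTids := tl.keys
  let res := pvTopLoopA tl min_sup allTids [] PySem.Set.empty
  let allSupported := res.1
  let tl2 := res.2.foldl (fun d key => d.erase key) tl
  -- r = max([len(t[0]) for t in all_supported]); ValueError on [] is excluded by Pre_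
  match PySem.List.max? (allSupported.map (fun t => PySem.List.len t.1)) (fun x => x) with
  | none => []
  | some r =>
    let allTids0 : PySem.Dict Int (PySem.Dict (List Int) (List Int)) :=
      PySem.Dict.insert PySem.Dict.empty 1 tl2
    let allTids1 := (PySem.List.pyRange 2 (r + 1) 1).foldl
      (fun d i => d.insert i PySem.Dict.empty) allTids0
    let allTids2 := allSupported.foldl
      (fun d val => d.modify (PySem.List.len val.1) PySem.Dict.empty
        (fun inner => inner.insert val.1 val.2)) allTids1
    allTids2.items.map (fun kv => (kv.1, kv.2.items))

-- ===== PORT B =====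
-- _frequent_extensions of Source B
def pvFreqExt (itemset : List Int) (tids : List Int) (rem : List (List Int)) (min_sup : Int)
    (flat : PySem.Dict (List Int) (List Int)) : List (List Int × List Int × List (List Int)) :=
  match rem with
  | [] => []
  | rk :: rest =>
    let inter := PySem.Set.inter tids (flat.getD rk [])
    (if min_sup ≤ PySem.Set.len inter then
       [(itemset ++ [PySem.List.pyGetD rk 0 0], inter, rest)]
     else []) ++ pvFreqExt itemset tids rest min_sup flat

-- termination measure for the explicit stack: a frame with n remaining candidates weighs 2^n,
-- and the frequent extensions of one frame always weigh strictly less than the frame itself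
theorem pvFreqExt_measure (itemset tids : List Int) (rem : List (List Int)) (min_sup : Int)
    (flat : PySem.Dict (List Int) (List Int)) :
    ((pvFreqExt itemset tids rem min_sup flat).map (fun f => 2 ^ f.2.2.length)).sum + 1
      ≤ 2 ^ rem.length := by
  induction rem with
  | nil => simp [pvFreqExt]
  | cons rk rest ih =>
    simp only [pvFreqExt, List.map_append, List.sum_append, List.length_cons]
    split
    · simp only [List.map_cons, List.map_nil, List.sum_cons, List.sum_nil]
      have : (2:ℕ) ^ (rest.length + 1) = 2 ^ rest.length + 2 ^ rest.length := by ring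
      omega
    · simp only [List.map_nil, List.sum_nil, Nat.zero_add]
      have h1 : (1:ℕ) ≤ 2 ^ rest.length := Nat.one_le_two_pow
      have : (2:ℕ) ^ (rest.length + 1) = 2 ^ rest.length + 2 ^ rest.length := by ring
      omega

-- the 'while stack:' loop of Source B (top of stack = head)
def pvDfsLoop (min_sup : Int) (flat : PySem.Dict (List Int) (List Int)) :
    List (List Int × List Int × List (List Int)) → List (List Int × List Int) →
    List (List Int × List Int)
  | [], acc => acc
  | f :: stack', acc =>
    let grand := pvFreqExt f.1 f.2.1 f.2.2 min_sup flat
    if grand = [] then pvDfsLoop min_sup flat stack' (acc ++ [(f.1, f.2.1)])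
    else pvDfsLoop min_sup flat (grand ++ stack') acc
  termination_by stack _ => ((stack.map (fun f => 2 ^ f.2.2.length)).sum)
  decreasing_by
  · simp only [List.map_cons, List.sum_cons]
    have h1 : (1:ℕ) ≤ 2 ^ f.2.2.length := Nat.one_le_two_pow
    omega
  · simp only [List.map_cons, List.sum_cons, List.map_append, List.sum_append]
    have := pvFreqExt_measure f.1 f.2.1 f.2.2 min_sup flat
    omega

-- the 'for i in range(len(keys))' loop of Source B, carrying (all_supported, level1)
def pvBTop (flat : PySem.Dict (List Int) (List Int)) (min_sup : Int) :
    List (List Int) → List (List Int × List Int) → PySem.Dict (List Int) (List Int) →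
    List (List Int × List Int) × PySem.Dict (List Int) (List Int)
  | [], acc, lvl => (acc, lvl)
  | k :: rest, acc, lvl =>
    let children := pvFreqExt k (flat.getD k []) rest min_sup flat
    if children = [] then pvBTop flat min_sup rest acc (lvl.insert k (flat.getD k []))
    else pvBTop flat min_sup rest (pvDfsLoop min_sup flat children acc) lvl

def True_Eclat_maximal_alt (tidlists : List (Int × List (Int × List Int))) (min_sup : Int) (only_first : Bool) : List (Int × List (List Int × List Int)) :=
  let flat0 := tidlists.foldl (fun d kv =>
    kv.2.foldl (fun d2 kv2 =>
      d2.insert (if only_first then [kv2.1] else [kv.1, kv2.1]) kv2.2) d) PySem.Dict.empty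
  let flat := flat0.items.foldl
    (fun d kv => if min_sup ≤ PySem.Set.len kv.2 then d.insert kv.1 kv.2 else d)
    PySem.Dict.empty
  let keys := flat.keys
  let res := pvBTop flat min_sup keys [] PySem.Dict.empty
  let allSupported := res.1
  let level1 := res.2
  match PySem.List.max? (allSupported.map (fun t => PySem.List.len t.1)) (fun x => x) with
  | none => []
  | some r =>
    let result0 : PySem.Dict Int (PySem.Dict (List Int) (List Int)) :=
      PySem.Dict.insert PySem.Dict.empty 1 level1
    let result1 := (PySem.List.pyRange 2 (r + 1) 1).foldl
      (fun d i => d.insert i PySem.Dict.empty) result0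
    let result2 := allSupported.foldl
      (fun d val => d.modify (PySem.List.len val.1) PySem.Dict.empty
        (fun inner => inner.insert val.1 val.2)) result1
    result2.items.map (fun kv => (kv.1, kv.2.items))

-- ===== PRECONDITION & SPEC =====
-- Pre_ helpers (independent of the ports): the flattened (only_first) dict, the filtered tid-sets
def pvPreFlat (tidlists : List (Int × List (Int × List Int))) : PySem.Dict (List Int) (List Int) :=
  tidlists.foldl (fun d kv => kv.2.foldl (fun d2 kv2 => d2.insert [kv2.1] kv2.2) d)
    PySem.Dict.empty

def pvHasPair (min_sup : Int) : List (List Int) → Bool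
  | [] => false
  | v :: rest =>
    rest.any (fun w => min_sup ≤ PySem.Set.len (PySem.Set.inter v w)) || pvHasPair min_sup rest

-- Pre_ excludes (a) only_first = false, where A's returned dict keys are 1-tuples of PAIRS of ints
-- and so are not values of the declared Lean key type List Int, and (b) inputs with no frequent
-- pair of frequent items, where A raises ValueError on max([]).
def Pre_True_Eclat_maximal (tidlists : List (Int × List (Int × List Int))) (min_sup : Int) (only_first : Bool) : Prop :=
  only_first = true ∧
  pvHasPair min_sup
    (((pvPreFlat tidlists).items.filter (fun kv => min_sup ≤ PySem.Set.len kv.2)).map (·.2)) = true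
instance (tidlists : List (Int × List (Int × List Int))) (min_sup : Int) (only_first : Bool) : Decidable (Pre_True_Eclat_maximal tidlists min_sup only_first) := by unfold Pre_True_Eclat_maximal; infer_instance

def pvWitness_True_Eclat_maximal : (List (Int × List (Int × List Int))) × Int × Bool :=
  ([(1, [(2, [0, 1]), (3, [0, 1])])], 1, true)

def Spec_True_Eclat_maximal (tidlists : List (Int × List (Int × List Int))) (min_sup : Int) (only_first : Bool) (out : List (Int × List (List Int × List Int))) : Prop := out = True_Eclat_maximal_alt tidlists min_sup only_first
instance (tidlists : List (Int × List (Int × List Int))) (min_sup : Int) (only_first : Bool) (out : List (Int × List (List Int × List Int))) : Decidable (Spec_True_Eclat_maximal tidlists min_sup only_first out) := by unfold Spec_True_Eclat_maximal; infer_instance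

-- ===== CLAIM (what is proved, stated in full; the proofs are below) =====
def Claim_equal_True_Eclat_maximal : Prop := ∀ (tidlists : List (Int × List (Int × List Int))) (min_sup : Int) (only_first : Bool), Dom_True_Eclat_maximal tidlists min_sup only_first → Pre_True_Eclat_maximal tidlists min_sup only_first → Spec_True_Eclat_maximal tidlists min_sup only_first (True_Eclat_maximal tidlists min_sup only_first)

-- ===== LEMMAS AND PROOFS =====

-- per-frame contribution of A's recursion: the leaf itself if the subtree is empty, else the subtree
def pvG (min_sup : Int) (tl : PySem.Dict (List Int) (List Int))
    (f : List Int × List Int × List (List Int)) : List (List Int × List Int) :=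
  let y := pvEclatRec (f.1, f.2.1) f.2.2 min_sup tl
  if y = [] then [(f.1, f.2.1)] else y

theorem pvG_ne_nil (m : Int) (tl : PySem.Dict (List Int) (List Int)) (f) :
    pvG m tl f ≠ [] := by
  unfold pvG
  by_cases h : pvEclatRec (f.1, f.2.1) f.2.2 m tl = [] <;> simp [h]

theorem pvEclatRec_eq_flatten (m : Int) (tl : PySem.Dict (List Int) (List Int)) :
    ∀ (rem : List (List Int)) (itemset tids : List Int),
      pvEclatRec (itemset, tids) rem m tl
        = ((pvFreqExt itemset tids rem m tl).map (pvG m tl)).flatten := by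
  intro rem
  induction rem with
  | nil => intro itemset tids; simp [pvEclatRec, pvFreqExt]
  | cons r rest ih =>
    intro itemset tids
    simp only [pvEclatRec, pvFreqExt]
    by_cases h : m ≤ PySem.Set.len (PySem.Set.inter tids (tl.getD r []))
    · simp only [if_pos h, List.map_append, List.map_cons, List.map_nil, List.flatten_append,
        List.flatten_cons, List.flatten_nil, ih]
      simp only [pvG, ih, List.append_nil]
    · simp only [if_neg h, List.nil_append, List.map_nil, List.flatten_nil, ih]

theorem pvDfsLoop_eq (m : Int) (tl : PySem.Dict (List Int) (List Int)) :
    ∀ (stack : List (List Int × List Int × List (List Int))) (acc : List (List Int × List Int)),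
      pvDfsLoop m tl stack acc = acc ++ (stack.map (pvG m tl)).flatten := by
  intro stack acc
  fun_induction pvDfsLoop m tl stack acc with
  | case1 acc => simp
  | case2 f stack' acc grand hg ih =>
    rw [ih]
    have hg' : pvFreqExt f.1 f.2.1 f.2.2 m tl = [] := hg
    have hGf : pvG m tl f = [(f.1, f.2.1)] := by
      unfold pvG
      rw [pvEclatRec_eq_flatten, hg']
      simp
    simp [hGf]
  | case3 f stack' acc grand hg ih =>
    rw [ih]
    have hg' : pvFreqExt f.1 f.2.1 f.2.2 m tl ≠ [] := hg
    have hne : ((pvFreqExt f.1 f.2.1 f.2.2 m tl).map (pvG m tl)).flatten ≠ [] := by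
      cases hgr : pvFreqExt f.1 f.2.1 f.2.2 m tl with
      | nil => exact absurd hgr hg'
      | cons g gs =>
        simp only [List.map_cons, List.flatten_cons, ne_eq, List.append_eq_nil_iff, not_and]
        intro hnil
        exact absurd hnil (pvG_ne_nil m tl g)
    have hGf : pvG m tl f = ((pvFreqExt f.1 f.2.1 f.2.2 m tl).map (pvG m tl)).flatten := by
      unfold pvG
      rw [pvEclatRec_eq_flatten]
      exact if_neg hne
    simp only [List.map_append, List.flatten_append, List.map_cons, List.flatten_cons, hGf,
      List.append_assoc]
    rfl

-- specifications of the two top-level loops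
def pvSupA (tl : PySem.Dict (List Int) (List Int)) (m : Int) : List (List Int) → List (List Int × List Int)
  | [] => []
  | k :: rest => pvEclatRec (k, tl.getD k []) rest m tl ++ pvSupA tl m rest

def pvDead (tl : PySem.Dict (List Int) (List Int)) (m : Int) : List (List Int) → List (List Int)
  | [] => []
  | k :: rest =>
    (if pvFreqExt k (tl.getD k []) rest m tl = [] then [] else [k]) ++ pvDead tl m rest

def pvLive (tl : PySem.Dict (List Int) (List Int)) (m : Int) : List (List Int) → List (List Int × List Int)
  | [] => []
  | k :: rest =>
    (if pvFreqExt k (tl.getD k []) rest m tl = [] then [(k, tl.getD k [])] else []) ++ pvLive tl m rest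

theorem pvTopLoopA_eq (tl : PySem.Dict (List Int) (List Int)) (m : Int) :
    ∀ (ks : List (List Int)) (acc : List (List Int × List Int)) (td : PySem.Set (List Int)),
      pvTopLoopA tl m ks acc td = (acc ++ pvSupA tl m ks, PySem.Set.update td (pvDead tl m ks)) := by
  intro ks
  induction ks with
  | nil => intro acc td; simp [pvTopLoopA, pvSupA, pvDead, PySem.Set.update]
  | cons k rest ih =>
    intro acc td
    simp only [pvTopLoopA, pvSupA, pvDead, ih, List.append_assoc]
    have hy : pvEclatRec (k, tl.getD k []) rest m tl = []
        ↔ pvFreqExt k (tl.getD k []) rest m tl = [] := by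
      rw [pvEclatRec_eq_flatten]
      constructor
      · intro h
        cases hfe : pvFreqExt k (tl.getD k []) rest m tl with
        | nil => rfl
        | cons g gs =>
          rw [hfe] at h
          simp only [List.map_cons, List.flatten_cons, List.append_eq_nil_iff] at h
          exact absurd h.1 (pvG_ne_nil m tl g)
      · intro h; rw [h]; simp
    by_cases hfe : pvFreqExt k (tl.getD k []) rest m tl = []
    · have h0 : pvEclatRec (k, tl.getD k []) rest m tl = [] := hy.mpr hfe
      simp [h0, hfe, PySem.List.len, PySem.Set.update]
    · have h0 : pvEclatRec (k, tl.getD k []) rest m tl ≠ [] := fun h => hfe (hy.mp h)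
      have hlen : PySem.List.len (pvEclatRec (k, tl.getD k []) rest m tl) ≠ 0 := by
        simp [PySem.List.len, List.length_eq_zero_iff, h0]
      simp only [hlen, if_neg hfe, ne_eq, not_false_eq_true, if_true, ite_not, if_neg h0,
        PySem.Set.update]
      simp [h0]

theorem pvBTop_eq (tl : PySem.Dict (List Int) (List Int)) (m : Int) :
    ∀ (ks : List (List Int)) (acc : List (List Int × List Int)) (lvl : PySem.Dict (List Int) (List Int)),
      pvBTop tl m ks acc lvl
        = (acc ++ pvSupA tl m ks,
           (pvLive tl m ks).foldl (fun d kv => d.insert kv.1 kv.2) lvl) := by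
  intro ks
  induction ks with
  | nil => intro acc lvl; simp [pvBTop, pvSupA, pvLive]
  | cons k rest ih =>
    intro acc lvl
    simp only [pvBTop, pvSupA, pvLive]
    by_cases hfe : pvFreqExt k (tl.getD k []) rest m tl = []
    · have h0 : pvEclatRec (k, tl.getD k []) rest m tl = [] := by
        rw [pvEclatRec_eq_flatten, hfe]; simp
      simp [hfe, h0, ih]
    · have hrec : pvEclatRec (k, tl.getD k []) rest m tl
          = ((pvFreqExt k (tl.getD k []) rest m tl).map (pvG m tl)).flatten :=
        pvEclatRec_eq_flatten m tl rest k (tl.getD k [])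
      simp only [if_neg hfe, ih, pvDfsLoop_eq, hrec, List.nil_append, List.append_assoc]


-- deleting a list of keys from a dict is one filter of its items
theorem pvEraseFold_items : ∀ (ks : List (List Int)) (d : PySem.Dict (List Int) (List Int)),
    (ks.foldl (fun d key => d.erase key) d).items
      = d.items.filter (fun p => decide (p.1 ∉ ks)) := by
  intro ks
  induction ks with
  | nil => intro d; simp
  | cons k rest ih =>
    intro d
    simp only [List.foldl_cons, ih]
    simp only [PySem.Dict.erase, PySem.Dict.items, List.filter_filter]
    apply List.filter_congr
    intro p _
    by_cases h1 : p.1 = k <;> by_cases h2 : p.1 ∈ rest <;> simp [h1, h2]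

-- membership in the conditional-add set loop
theorem pvMemAddIf (c : List Int → Prop) [DecidablePred c] :
    ∀ (ks : List (List Int)) (s0 : PySem.Set (List Int)) (x : List Int),
      x ∈ ks.foldl (fun s key => if c key then PySem.Set.add s key else s) s0
        ↔ x ∈ s0 ∨ (x ∈ ks ∧ c x) := by
  intro ks
  induction ks with
  | nil => intro s0 x; simp
  | cons k rest ih =>
    intro s0 x
    simp only [List.foldl_cons, ih, List.mem_cons]
    by_cases hc : c k
    · simp only [if_pos hc, PySem.Set.mem_add]
      constructor
      · rintro (⟨h | rfl⟩ | ⟨h1, h2⟩)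
        · exact Or.inl h
        · exact Or.inr ⟨Or.inl rfl, hc⟩
        · exact Or.inr ⟨Or.inr h1, h2⟩
      · rintro (h | ⟨rfl | h1, h2⟩)
        · exact Or.inl (Or.inl h)
        · exact Or.inl (Or.inr rfl)
        · exact Or.inr ⟨h1, h2⟩
    · simp only [if_neg hc]
      constructor
      · rintro (h | ⟨h1, h2⟩)
        · exact Or.inl h
        · exact Or.inr ⟨Or.inr h1, h2⟩
      · rintro (h | ⟨rfl | h1, h2⟩)
        · exact Or.inl h
        · exact absurd h2 hc
        · exact Or.inr ⟨h1, h2⟩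

-- a fold of inserts over fresh distinct keys appends the pairs
theorem pvInsertFold_items : ∀ (l : List (List Int × List Int)) (d : PySem.Dict (List Int) (List Int)),
    (∀ p ∈ l, d.contains p.1 = false) → (l.map Prod.fst).Nodup →
    (l.foldl (fun d kv => d.insert kv.1 kv.2) d).items = d.items ++ l := by
  intro l
  induction l with
  | nil => intro d _ _; simp
  | cons kv rest ih =>
    intro d hfresh hnd
    simp only [List.map_cons, List.nodup_cons] at hnd
    have hkv : d.contains kv.1 = false := hfresh kv (by simp)
    have hfresh' : ∀ p ∈ rest, (d.insert kv.1 kv.2).contains p.1 = false := by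
      intro p hp
      rw [PySem.Dict.contains_insert]
      have h1 : (p.1 == kv.1) = false := by
        simp only [beq_eq_false_iff_ne, ne_eq]
        intro he
        exact hnd.1 (he ▸ List.mem_map_of_mem hp)
      rw [h1, hfresh p (by simp [hp])]
      rfl
    simp only [List.foldl_cons]
    rw [ih _ hfresh' hnd.2, PySem.Dict.items_insert_of_not_contains _ _ hkv]
    simp

-- a filtering fold of inserts over fresh distinct keys appends the filtered pairs
theorem pvFilterFold_items (m : Int) :
    ∀ (l : List (List Int × List Int)) (d : PySem.Dict (List Int) (List Int)),
    (∀ p ∈ l, d.contains p.1 = false) → (l.map Prod.fst).Nodup →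
    (l.foldl (fun d kv => if m ≤ PySem.Set.len kv.2 then d.insert kv.1 kv.2 else d) d).items
      = d.items ++ l.filter (fun kv => m ≤ PySem.Set.len kv.2) := by
  intro l
  induction l with
  | nil => intro d _ _; simp
  | cons kv rest ih =>
    intro d hfresh hnd
    simp only [List.map_cons, List.nodup_cons] at hnd
    have hkv : d.contains kv.1 = false := hfresh kv (by simp)
    simp only [List.foldl_cons, List.filter_cons]
    by_cases hq : m ≤ PySem.Set.len kv.2
    · have hfresh' : ∀ p ∈ rest, (d.insert kv.1 kv.2).contains p.1 = false := by
        intro p hp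
        rw [PySem.Dict.contains_insert]
        have h1 : (p.1 == kv.1) = false := by
          simp only [beq_eq_false_iff_ne, ne_eq]
          intro he
          exact hnd.1 (he ▸ List.mem_map_of_mem hp)
        rw [h1, hfresh p (by simp [hp])]
        rfl
      rw [if_pos hq, ih _ hfresh' hnd.2, PySem.Dict.items_insert_of_not_contains _ _ hkv]
      have hdq : (decide (m ≤ PySem.Set.len kv.2)) = true := by
        simp only [decide_eq_true_eq]; exact hq
      simp only [hdq, if_true, List.append_assoc, List.singleton_append]
    · rw [if_neg hq, ih _ (fun p hp => hfresh p (by simp [hp])) hnd.2]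
      have hdq : (decide (m ≤ PySem.Set.len kv.2)) = false := by
        simp only [decide_eq_false_iff_not]; exact hq
      simp only [hdq, Bool.false_eq_true, if_false]

-- the flatten loop keeps the dict keys duplicate-free
theorem pvFlatten_nodup (only_first : Bool) :
    ∀ (t : List (Int × List (Int × List Int))) (d : PySem.Dict (List Int) (List Int)),
    d.keys.Nodup →
    (t.foldl (fun nd kv =>
      kv.2.foldl (fun nd2 kv2 =>
        if only_first then nd2.insert [kv2.1] kv2.2 else nd2.insert [kv.1, kv2.1] kv2.2) nd)
      d).keys.Nodup := by
  intro t
  induction t with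
  | nil => intro d h; simpa
  | cons kv rest ih =>
    intro d h
    simp only [List.foldl_cons]
    apply ih
    cases only_first with
    | true =>
      simp only [if_true]
      exact PySem.Dict.nodup_keys_foldl_insert_key kv.2 (fun kv2 => [kv2.1]) (fun _ kv2 => kv2.2) d h
    | false =>
      simp only [Bool.false_eq_true, if_false]
      exact PySem.Dict.nodup_keys_foldl_insert_key kv.2 (fun kv2 => [kv.1, kv2.1]) (fun _ kv2 => kv2.2) d h

theorem pvDead_sublist (tl : PySem.Dict (List Int) (List Int)) (m : Int) :
    ∀ ks : List (List Int), List.Sublist (pvDead tl m ks) ks := by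
  intro ks
  induction ks with
  | nil => simp [pvDead]
  | cons k rest ih =>
    simp only [pvDead]
    split
    · simpa using ih.trans (List.sublist_cons_self k rest)
    · simpa using List.Sublist.cons₂ k ih

theorem pvLive_fst_sublist (tl : PySem.Dict (List Int) (List Int)) (m : Int) :
    ∀ ks : List (List Int), List.Sublist ((pvLive tl m ks).map Prod.fst) ks := by
  intro ks
  induction ks with
  | nil => simp [pvLive]
  | cons k rest ih =>
    simp only [pvLive]
    split
    · simpa using List.Sublist.cons₂ k ih
    · simpa using ih.trans (List.sublist_cons_self k rest)

-- the keys kept by A's deletion are exactly the keys B inserts into level1, in order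
theorem pvLive_keys (tl : PySem.Dict (List Int) (List Int)) (m : Int) :
    ∀ ks : List (List Int), ks.Nodup →
      ks.filter (fun x => decide (x ∉ pvDead tl m ks)) = (pvLive tl m ks).map Prod.fst := by
  intro ks
  induction ks with
  | nil => simp [pvDead, pvLive]
  | cons k rest ih =>
    intro hnd
    simp only [List.nodup_cons] at hnd
    have hkd : k ∉ pvDead tl m rest := fun h => hnd.1 ((pvDead_sublist tl m rest).mem h)
    by_cases hfe : pvFreqExt k (tl.getD k []) rest m tl = []
    · have hd : pvDead tl m (k :: rest) = pvDead tl m rest := by simp [pvDead, hfe]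
      have hl : pvLive tl m (k :: rest) = (k, tl.getD k []) :: pvLive tl m rest := by
        simp [pvLive, hfe]
      simp only [hd, hl, List.filter_cons, List.map_cons]
      have hk : (decide (k ∉ pvDead tl m rest)) = true := by simpa using hkd
      simp only [hk, if_true, ih hnd.2]
    · have hd : pvDead tl m (k :: rest) = k :: pvDead tl m rest := by simp [pvDead, hfe]
      have hl : pvLive tl m (k :: rest) = pvLive tl m rest := by simp [pvLive, hfe]
      simp only [hd, hl, List.filter_cons]
      have hk : (decide (k ∉ k :: pvDead tl m rest)) = false := by simp
      simp only [hk, Bool.false_eq_true, if_false]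
      have h2 : rest.filter (fun x => decide (x ∉ k :: pvDead tl m rest))
          = rest.filter (fun x => decide (x ∉ pvDead tl m rest)) := by
        apply List.filter_congr
        intro x hx
        have hxk : x ≠ k := fun he => hnd.1 (he ▸ hx)
        simp [hxk]
      rw [h2, ih hnd.2]

theorem pvLive_map_self (tl : PySem.Dict (List Int) (List Int)) (m : Int) :
    ∀ ks : List (List Int),
      (pvLive tl m ks).map (fun q => (q.1, tl.getD q.1 [])) = pvLive tl m ks := by
  intro ks
  induction ks with
  | nil => simp [pvLive]
  | cons k rest ih =>
    simp only [pvLive, List.map_append, ih]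
    split <;> simp

-- A's first delete loop = B's filtering dict comprehension
theorem pvFilterMain (tl0 : PySem.Dict (List Int) (List Int)) (m : Int)
    (hnd : tl0.keys.Nodup) :
    ((tl0.keys.foldl
        (fun s key => if PySem.Set.len (tl0.getD key []) < m then PySem.Set.add s key else s)
        PySem.Set.empty).foldl (fun d key => d.erase key) tl0)
      = tl0.items.foldl
          (fun d kv => if m ≤ PySem.Set.len kv.2 then d.insert kv.1 kv.2 else d)
          PySem.Dict.empty := by
  apply PySem.Dict.ext
  rw [pvEraseFold_items, pvFilterFold_items m _ _ (fun p _ => PySem.Dict.contains_empty _) hnd]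
  have hemp : (PySem.Dict.empty : PySem.Dict (List Int) (List Int)).items = [] := rfl
  rw [hemp, List.nil_append]
  apply List.filter_congr
  intro p hp
  have hmem : p.1 ∈ tl0.keys := List.mem_map_of_mem hp
  have hget : tl0.getD p.1 [] = p.2 := PySem.Dict.getD_of_mem_items tl0 hp hnd []
  have hiff : (p.1 ∈ tl0.keys.foldl
      (fun s key => if PySem.Set.len (tl0.getD key []) < m then PySem.Set.add s key else s)
      PySem.Set.empty) ↔ PySem.Set.len (tl0.getD p.1 []) < m := by
    rw [pvMemAddIf (fun key => PySem.Set.len (tl0.getD key []) < m) tl0.keys PySem.Set.empty p.1]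
    simp [PySem.Set.empty, hmem]
  exact decide_eq_decide.mpr ((not_congr hiff).trans (by rw [hget]; exact Int.not_lt))

-- A's second delete loop = B's level1 insertions
theorem pvMain (tl : PySem.Dict (List Int) (List Int)) (m : Int) (hnd : tl.keys.Nodup) :
    (PySem.Set.update PySem.Set.empty (pvDead tl m tl.keys)).foldl
        (fun d key => d.erase key) tl
      = (pvLive tl m tl.keys).foldl (fun d kv => d.insert kv.1 kv.2) PySem.Dict.empty := by
  apply PySem.Dict.ext
  have hsubl := pvLive_fst_sublist tl m tl.keys
  rw [pvEraseFold_items,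
    pvInsertFold_items _ _ (fun p _ => PySem.Dict.contains_empty _) (hnd.sublist hsubl)]
  have hemp : (PySem.Dict.empty : PySem.Dict (List Int) (List Int)).items = [] := rfl
  rw [hemp, List.nil_append]
  have hupd : PySem.Set.update PySem.Set.empty (pvDead tl m tl.keys)
      = PySem.Set.ofList (pvDead tl m tl.keys) := by
    rw [PySem.Set.ofList_eq_foldl]; rfl
  rw [hupd]
  have hcongr : tl.items.filter (fun p => decide (p.1 ∉ PySem.Set.ofList (pvDead tl m tl.keys)))
      = tl.items.filter (fun p => decide (p.1 ∉ pvDead tl m tl.keys)) := by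
    apply List.filter_congr
    intro p _
    simp [PySem.Set.mem_ofList]
  rw [hcongr, PySem.Dict.items_eq_map_keys tl hnd [], List.filter_map]
  have hp2 : ((fun p => decide (p.1 ∉ pvDead tl m tl.keys)) ∘ fun k => (k, tl.getD k []))
      = (fun x => decide (x ∉ pvDead tl m tl.keys)) := by
    funext x; simp
  rw [hp2, pvLive_keys tl m tl.keys hnd, List.map_map]
  exact pvLive_map_self tl m tl.keys

-- ===== VERDICT (by name: the statement is the Claim_ definition above) =====
theorem True_Eclat_maximal_spec : Claim_equal_True_Eclat_maximal := by
  intro t m of hdom hpre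
  unfold Spec_True_Eclat_maximal
  obtain ⟨hof, -⟩ := hpre
  subst hof
  have hnd0 : (pvFlattenDict t true).keys.Nodup := by
    unfold pvFlattenDict
    exact pvFlatten_nodup true t PySem.Dict.empty (by simp [PySem.Dict.empty, PySem.Dict.keys])
  have hflat : (t.foldl (fun d kv =>
      kv.2.foldl (fun d2 kv2 => d2.insert [kv2.1] kv2.2) d) PySem.Dict.empty)
      = pvFlattenDict t true := rfl
  have hndF : ((pvFlattenDict t true).items.foldl
      (fun d kv => if m ≤ PySem.Set.len kv.2 then d.insert kv.1 kv.2 else d)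
      PySem.Dict.empty).keys.Nodup := by
    have hi := pvFilterFold_items m (pvFlattenDict t true).items PySem.Dict.empty
      (fun p _ => PySem.Dict.contains_empty _) hnd0
    have hemp : (PySem.Dict.empty : PySem.Dict (List Int) (List Int)).items = [] := rfl
    rw [hemp, List.nil_append] at hi
    show (List.map Prod.fst _).Nodup
    rw [hi]
    exact hnd0.sublist (List.Sublist.map Prod.fst List.filter_sublist)
  simp only [True_Eclat_maximal, True_Eclat_maximal_alt, eq_self_iff_true, if_true]
  rw [hflat, pvFilterMain (pvFlattenDict t true) m hnd0]
  simp only [pvTopLoopA_eq, pvBTop_eq, List.nil_append]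
  rw [pvMain _ m hndF]
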